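-- pv_equiv track=rewrite | github.com/JGCRI/DeepClimGAN | Utils.py | snake_data_partition
-- ===== SOURCE A (Python) =====
-- def snake_data_partition(sorted_files, world_size):
-- 	partition = {}
-- 	n_processes = world_size
-- 	file_groups = []
-- 	i = 0
--
-- 	N = len(sorted_files)
--
-- 	files = []
-- 	for file in sorted_files:
-- 		files.append(file[1])
--
-- 	if n_processes == 1:
-- 		partition[0] = files
-- 		#partition[0] = [files[0]] #for testing
-- 		return partition
--
-- 	sorted_files = files
--
-- 	#split files per groups
-- 	while i < N:
-- 		if i + n_processes > N:
-- 			group = sorted_files[i:]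
-- 		else:
-- 			group = sorted_files[i:i+n_processes]
--
-- 		file_groups.append(group)
--
-- 		i += n_processes
--
-- 	#distribute files between processes
-- 	i = 0
-- 	N_groups = len(file_groups)
--
-- 	while i < N_groups:
-- 		group = file_groups[i]
-- 		group_len = len(group)
-- 		#first group goes from left to right
-- 		#then from right to left
-- 		if i % 2 == 0:
-- 			if i == 0:
-- 				for j in range(0,group_len):
-- 					partition[j] = [group[j]]
-- 			else:
-- 				for j in range(0,group_len):
-- 					partition[j].append(group[j])
-- 		else:
-- 			group = group[::-1]
-- 			for j in range(group_len):
-- 				part = partition[world_size - 1 - j]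
-- 				part.append(group[j])
--
--
-- 		i += 1
-- 	return partition
-- ===== SOURCE B (Python) =====
-- def snake_data_partition(sorted_files, world_size):
--     files = [f[1] for f in sorted_files]
--     if world_size == 1:
--         return {0: files}
--     partition = {}
--     N = len(files)
--     for idx, f in enumerate(files):
--         r, pos = divmod(idx, world_size)
--         if r % 2 == 0:
--             p = pos
--         else:
--             p = world_size - min(world_size, N - r * world_size) + pos
--         partition[p] = partition.get(p, []) + [f]
--     return partition
-- ===== Notes on version B (the rewrite author's own statement) =====
-- stated objective: simpler
-- what changed: Replaces A's two-phase while-loops (explicit chunking into groups, then a boustrophedon distribution with three separate inner loops) by a single pass over enumerate(files) that computes each file's process index arithmetically from divmod(idx, world_size), with dict.get-append insertion.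
import Mathlib
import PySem

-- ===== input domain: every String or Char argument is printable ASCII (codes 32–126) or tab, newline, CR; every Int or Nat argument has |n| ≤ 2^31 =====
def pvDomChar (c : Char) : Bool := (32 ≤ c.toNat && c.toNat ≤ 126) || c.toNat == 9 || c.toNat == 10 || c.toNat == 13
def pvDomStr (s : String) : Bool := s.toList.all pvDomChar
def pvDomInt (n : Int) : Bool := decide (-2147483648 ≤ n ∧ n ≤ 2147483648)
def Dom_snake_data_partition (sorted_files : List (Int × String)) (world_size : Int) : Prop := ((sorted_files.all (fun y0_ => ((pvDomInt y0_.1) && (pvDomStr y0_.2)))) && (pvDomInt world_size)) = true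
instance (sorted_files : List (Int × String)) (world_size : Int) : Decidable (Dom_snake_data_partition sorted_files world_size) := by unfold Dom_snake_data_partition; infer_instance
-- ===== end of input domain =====

-- B replaces A's two-phase while-loops (chunk into groups, then snake-distribute each group
-- with three inner loops) by one pass computing each file's process from divmod(idx, world_size);
-- objective: simpler.

-- ===== PORT A =====
-- files = []; for file in sorted_files: files.append(file[1])
def pvFilesOf (sorted_files : List (Int × String)) : List String :=
  sorted_files.foldl (fun acc file => acc ++ [file.2]) []

-- the 'while i < N' chunking loop; fuel = N + 1 bounds its iterations (with world_size ≤ 0 and a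
-- nonempty list the Python loop never terminates; those inputs are outside Pre_).
def pvChunkLoop (n : Int) (files : List String) : Nat → Int → List (List String) → List (List String)
  | 0, _, acc => acc
  | fuel+1, i, acc =>
    if i < (files.length : Int) then
      let group := if i + n > (files.length : Int)
        then PySem.List.slice files (some i) none
        else PySem.List.slice files (some i) (some (i + n))
      pvChunkLoop n files fuel (i + n) (acc ++ [group])
    else acc

-- the 'while i < N_groups' distribution loop; each 'for j in range(...)' over a group is the fold
-- over PySem.List.enumerate of the group (same indices j, same elements group[j]);
-- group[::-1] is g.reverse (PySem.List.slice?_none_none_neg_one);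
-- partition[j].append(x) is Dict.modify j [] (· ++ [x]) (the key is present on every admitted input).
def pvDistLoop (world_size : Int) : List (List String) → Int → PySem.Dict Int (List String) → PySem.Dict Int (List String)
  | [], _, d => d
  | g :: rest, i, d =>
    let d' :=
      if PySem.Int.mod i 2 == 0 then
        if i == 0 then
          (PySem.List.enumerate g 0).foldl (fun d jx => d.insert jx.1 [jx.2]) d
        else
          (PySem.List.enumerate g 0).foldl (fun d jx => d.modify jx.1 [] (fun v => v ++ [jx.2])) d
      else
        (PySem.List.enumerate g.reverse 0).foldl (fun d jx => d.modify (world_size - 1 - jx.1) [] (fun v => v ++ [jx.2])) d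
    pvDistLoop world_size rest (i + 1) d'

def snake_data_partition (sorted_files : List (Int × String)) (world_size : Int) : List (Int × List String) :=
  let files := pvFilesOf sorted_files
  if world_size == 1 then
    ((PySem.Dict.empty : PySem.Dict Int (List String)).insert 0 files).items
  else
    let groups := pvChunkLoop world_size files (files.length + 1) 0 []
    (pvDistLoop world_size groups 0 PySem.Dict.empty).items

-- ===== PORT B =====
-- partition[p] = partition.get(p, []) + [f]  is  Dict.modify p [] (· ++ [f])
def pvBStep (world_size N : Int) (d : PySem.Dict Int (List String)) (p : Int × String) : PySem.Dict Int (List String) :=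
  let r := PySem.Int.floordiv p.1 world_size
  let pos := PySem.Int.mod p.1 world_size
  let q := if PySem.Int.mod r 2 == 0 then pos else world_size - min world_size (N - r * world_size) + pos
  d.modify q [] (fun v => v ++ [p.2])

def snake_data_partition_alt (sorted_files : List (Int × String)) (world_size : Int) : List (Int × List String) :=
  let files := sorted_files.map (fun f => f.2)
  if world_size == 1 then [((0 : Int), files)]
  else
    ((PySem.List.enumerate files 0).foldl (pvBStep world_size (files.length : Int)) PySem.Dict.empty).items

-- ===== PRECONDITION & SPEC =====
-- Pre_ excludes world_size ≤ 0 with a nonempty list: there A's first while loop (i stepping by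
-- world_size ≤ 0) never terminates, so A returns on no such input.
def Pre_snake_data_partition (sorted_files : List (Int × String)) (world_size : Int) : Prop :=
  1 ≤ world_size ∨ sorted_files = []

instance (sorted_files : List (Int × String)) (world_size : Int) : Decidable (Pre_snake_data_partition sorted_files world_size) := by unfold Pre_snake_data_partition; infer_instance

def pvWitness_snake_data_partition : (List (Int × String)) × Int := ([(1, "a"), (2, "b"), (3, "c")], 2)

def Spec_snake_data_partition (sorted_files : List (Int × String)) (world_size : Int) (out : List (Int × List String)) : Prop := out = snake_data_partition_alt sorted_files world_size
instance (sorted_files : List (Int × String)) (world_size : Int) (out : List (Int × List String)) : Decidable (Spec_snake_data_partition sorted_files world_size out) := by unfold Spec_snake_data_partition; infer_instance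

-- ===== CLAIM (what is proved, stated in full; the proofs are below) =====
def Claim_equal_snake_data_partition : Prop := ∀ (sorted_files : List (Int × String)) (world_size : Int), Dom_snake_data_partition sorted_files world_size → Pre_snake_data_partition sorted_files world_size → Spec_snake_data_partition sorted_files world_size (snake_data_partition sorted_files world_size)

-- ===== LEMMAS AND PROOFS =====

-- The canonical dict shape both loops maintain: keys 0,1,…,vs.length-1 in order.
def cdict (vs : List (List String)) : PySem.Dict Int (List String) := ⟨PySem.List.enumerate vs 0⟩

-- the pure per-file update: bucket p gets x appended
def pvUpd (vs : List (List String)) (p : Nat) (x : String) : List (List String) :=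
  vs.set p (vs.getD p [] ++ [x])

def pvUpd2 (vs : List (List String)) (px : Nat × String) : List (List String) := pvUpd vs px.1 px.2

-- (bucket, file) pairs of one group, buckets j0, j0+1, …
def pvOps (j0 : Nat) : List String → List (Nat × String)
  | [] => []
  | x :: t => (j0, x) :: pvOps (j0+1) t

-- pure view of A's chunking
def pvChunks (w : Nat) : Nat → List String → List (List String)
  | 0, _ => []
  | fuel+1, l => if l = [] then [] else l.take w :: pvChunks w fuel (l.drop w)

lemma pvFilesOf_eq (sf : List (Int × String)) : pvFilesOf sf = sf.map (fun f => f.2) := by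
  have h : ∀ (l : List (Int × String)) (acc : List String),
      l.foldl (fun acc file => acc ++ [file.2]) acc = acc ++ l.map (fun f => f.2) := by
    intro l
    induction l with
    | nil => intro acc; simp
    | cons x t ih => intro acc; simp [ih]
  unfold pvFilesOf
  exact (h sf []).trans (List.nil_append _)

lemma pv_get?_cenum : ∀ (vs : List (List String)) (s k : Int),
    (PySem.Dict.mk (PySem.List.enumerate vs s)).get? k =
      if s ≤ k ∧ k < s + vs.length then vs[(k - s).toNat]? else none := by
  intro vs
  induction vs with
  | nil =>
    intro s k
    have : PySem.List.enumerate ([] : List (List String)) s = [] := rfl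
    rw [this]
    simp [PySem.Dict.get?]
  | cons v t ih =>
    intro s k
    rw [PySem.List.enumerate_cons, PySem.Dict.get?_mk_cons, ih]
    by_cases h : s = k
    · subst h
      simp only [BEq.rfl, if_true]
      rw [if_pos (by constructor <;> [exact le_refl s; (simp only [List.length_cons]; push_cast; omega)])]
      simp
    · have hb : (s == k) = false := by simp [h]
      rw [hb]
      simp only [Bool.false_eq_true, if_false]
      by_cases h2 : s + 1 ≤ k ∧ k < s + 1 + t.length
      · rw [if_pos h2, if_pos (by simp only [List.length_cons] at h2 ⊢; push_cast at h2 ⊢; omega)]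
        have hn : (k - s).toNat = (k - (s+1)).toNat + 1 := by omega
        rw [hn, List.getElem?_cons_succ]
      · rw [if_neg h2, if_neg (by simp only [List.length_cons] at h2 ⊢; push_cast at h2 ⊢; omega)]

lemma pv_contains_eq (d : PySem.Dict Int (List String)) (k : Int) :
    d.contains k = (d.get? k).isSome := by
  rcases d with ⟨items⟩
  induction items with
  | nil => rfl
  | cons p t ih =>
    obtain ⟨k1, v1⟩ := p
    rw [PySem.Dict.get?_mk_cons]
    simp only [PySem.Dict.contains, List.any_cons] at ih ⊢
    cases hpk : (k1 == k) <;> simp [ih]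

lemma pv_map_id : ∀ (vs : List (List String)) (s k : Int) (v : List String), k < s →
    (PySem.List.enumerate vs s).map (fun pr => if pr.1 == k then (k, v) else pr)
      = PySem.List.enumerate vs s := by
  intro vs
  induction vs with
  | nil => intro s k v _; rfl
  | cons w t ih =>
    intro s k v h
    rw [PySem.List.enumerate_cons, List.map_cons]
    have hb : (s == k) = false := by simp; omega
    rw [hb]
    simp only [Bool.false_eq_true, if_false]
    rw [ih (s+1) k v (by omega)]

lemma pv_map_set : ∀ (vs : List (List String)) (s k : Int) (v : List String), s ≤ k → k < s + vs.length →
    (PySem.List.enumerate vs s).map (fun pr => if pr.1 == k then (k, v) else pr)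
      = PySem.List.enumerate (vs.set (k - s).toNat v) s := by
  intro vs
  induction vs with
  | nil => intro s k v h1 h2; simp only [List.length_nil] at h2; omega
  | cons w t ih =>
    intro s k v h1 h2
    by_cases h : s = k
    · subst h
      have hn : (s - s).toNat = 0 := by omega
      rw [hn]
      rw [PySem.List.enumerate_cons, List.map_cons, List.set_cons_zero]
      simp only [BEq.rfl, if_true]
      rw [pv_map_id t (s+1) s v (by omega), PySem.List.enumerate_cons]
    · have hn : (k - s).toNat = (k - (s+1)).toNat + 1 := by omega
      rw [hn, List.set_cons_succ]
      rw [PySem.List.enumerate_cons, List.map_cons]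
      have hb : (s == k) = false := by simp [h]
      rw [hb]
      simp only [Bool.false_eq_true, if_false]
      rw [ih (s+1) k v (by omega) (by simp only [List.length_cons] at h2 ⊢; push_cast at h2 ⊢; omega),
          PySem.List.enumerate_cons]

lemma pv_insert_mem (vs : List (List String)) (s k : Int) (v : List String)
    (h1 : s ≤ k) (h2 : k < s + vs.length) :
    (PySem.Dict.mk (PySem.List.enumerate vs s)).insert k v
      = PySem.Dict.mk (PySem.List.enumerate (vs.set (k - s).toNat v) s) := by
  have hc : (PySem.Dict.mk (PySem.List.enumerate vs s)).contains k = true := by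
    rw [pv_contains_eq, pv_get?_cenum, if_pos ⟨h1, h2⟩]
    simp
    omega
  simp only [PySem.Dict.insert, hc, if_true]
  exact congrArg PySem.Dict.mk (pv_map_set vs s k v h1 h2)

lemma pv_insert_fresh (vs : List (List String)) (s : Int) (v : List String) :
    (PySem.Dict.mk (PySem.List.enumerate vs s)).insert (s + ↑vs.length) v
      = PySem.Dict.mk (PySem.List.enumerate (vs ++ [v]) s) := by
  have hc : (PySem.Dict.mk (PySem.List.enumerate vs s)).contains (s + ↑vs.length) = false := by
    rw [pv_contains_eq, pv_get?_cenum, if_neg (by omega)]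
    rfl
  simp only [PySem.Dict.insert, hc]
  simp only [Bool.false_eq_true, if_false]
  rw [PySem.List.enumerate_append]
  rfl

lemma pv_getD_cdict (vs : List (List String)) (p : Nat) :
    (cdict vs).getD (↑p) [] = vs.getD p [] := by
  simp only [cdict, PySem.Dict.getD]
  rw [pv_get?_cenum, List.getD_eq_getElem?_getD]
  by_cases hp : p < vs.length
  · rw [if_pos (by constructor <;> omega)]
    simp
  · rw [if_neg (by omega)]
    rw [List.getElem?_eq_none (by omega)]

lemma pv_modify_cdict (vs : List (List String)) (p : Nat) (hp : p < vs.length) (x : String) :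
    (cdict vs).modify (↑p) [] (fun v => v ++ [x]) = cdict (pvUpd vs p x) := by
  have hm : (cdict vs).modify (↑p) [] (fun v => v ++ [x])
      = (cdict vs).insert (↑p) ((cdict vs).getD (↑p) [] ++ [x]) := rfl
  rw [hm, pv_getD_cdict]
  show (PySem.Dict.mk (PySem.List.enumerate vs 0)).insert (↑p) _ = _
  rw [pv_insert_mem vs 0 (↑p) _ (by omega) (by omega)]
  simp [cdict, pvUpd]

lemma pv_modify_cdict_fresh (vs : List (List String)) (x : String) :
    (cdict vs).modify (↑vs.length) [] (fun v => v ++ [x]) = cdict (vs ++ [[x]]) := by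
  have hm : (cdict vs).modify (↑vs.length) [] (fun v => v ++ [x])
      = (cdict vs).insert (↑vs.length) ((cdict vs).getD (↑vs.length) [] ++ [x]) := rfl
  rw [hm, pv_getD_cdict]
  rw [List.getD_eq_getElem?_getD, List.getElem?_eq_none (le_refl _)]
  show (PySem.Dict.mk (PySem.List.enumerate vs 0)).insert (↑vs.length) _ = _
  have h0 : (↑vs.length : Int) = 0 + ↑vs.length := by omega
  rw [h0, pv_insert_fresh vs 0 _]
  simp [cdict]

lemma pv_insert_cdict_fresh (vs : List (List String)) (v : List String) :
    (cdict vs).insert (↑vs.length) v = cdict (vs ++ [v]) := by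
  show (PySem.Dict.mk (PySem.List.enumerate vs 0)).insert (↑vs.length) v = _
  have h0 : (↑vs.length : Int) = 0 + ↑vs.length := by omega
  rw [h0, pv_insert_fresh vs 0 v]
  rfl

-- group 0, A side: consecutive fresh inserts append singleton buckets
lemma pv_grp0A : ∀ (g : List String) (vs : List (List String)),
    (PySem.List.enumerate g (↑vs.length)).foldl (fun d jx => d.insert jx.1 [jx.2]) (cdict vs)
      = cdict (vs ++ g.map (fun x => [x])) := by
  intro g
  induction g with
  | nil => intro vs; simp [PySem.List.enumerate]
  | cons x t ih =>
    intro vs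
    rw [PySem.List.enumerate_cons, List.foldl_cons]
    simp only
    rw [pv_insert_cdict_fresh]
    have hs : (↑vs.length : Int) + 1 = ↑(vs ++ [[x]]).length := by simp
    rw [hs, ih (vs ++ [[x]])]
    simp

lemma pv_grp0A' (g : List String) :
    (PySem.List.enumerate g 0).foldl (fun d jx => d.insert jx.1 [jx.2]) (cdict [])
      = cdict (g.map (fun x => [x])) := by
  simpa using pv_grp0A g []

-- group 0, B side: same fresh appends (divmod gives r = 0, even, q = idx)
lemma pv_grp0B (w N : Nat) (_hw : 0 < w) : ∀ (g : List String) (vs : List (List String)),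
    vs.length + g.length ≤ w →
    (PySem.List.enumerate g (↑vs.length)).foldl (pvBStep (↑w) (↑N)) (cdict vs)
      = cdict (vs ++ g.map (fun x => [x])) := by
  intro g
  induction g with
  | nil => intro vs _; simp [PySem.List.enumerate]
  | cons x t ih =>
    intro vs hle
    simp only [List.length_cons] at hle
    rw [PySem.List.enumerate_cons, List.foldl_cons]
    have hstep : pvBStep (↑w) (↑N) (cdict vs) (↑vs.length, x) = cdict (vs ++ [[x]]) := by
      simp only [pvBStep]
      have hdiv : PySem.Int.floordiv (↑vs.length) (↑w) = ((vs.length / w : Nat) : Int) :=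
        PySem.Int.floordiv_natCast _ _
      have hdiv0 : ((vs.length / w : Nat) : Int) = 0 := by
        rw [Nat.div_eq_of_lt (by omega)]; rfl
      have hmod : PySem.Int.mod (↑vs.length) (↑w) = ((vs.length % w : Nat) : Int) :=
        PySem.Int.mod_natCast _ _
      have hmod' : ((vs.length % w : Nat) : Int) = ↑vs.length := by
        rw [Nat.mod_eq_of_lt (by omega)]
      rw [hdiv, hdiv0, hmod, hmod']
      norm_num
      exact pv_modify_cdict_fresh vs x
    rw [hstep]
    have hs : (↑vs.length : Int) + 1 = ↑(vs ++ [[x]]).length := by simp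
    rw [hs, ih (vs ++ [[x]]) (by simp only [List.length_append, List.length_cons, List.length_nil]; omega)]
    simp

lemma pv_grp0B' (w N : Nat) (hw : 0 < w) (g : List String) (hg : g.length ≤ w) :
    (PySem.List.enumerate g 0).foldl (pvBStep (↑w) (↑N)) (cdict [])
      = cdict (g.map (fun x => [x])) := by
  simpa using pv_grp0B w N hw g [] (by simpa using hg)

-- later even group, A side
lemma pv_chunkA_even (w : Nat) : ∀ (g : List String) (j0 : Nat) (vs : List (List String)),
    vs.length = w → j0 + g.length ≤ w →
    (PySem.List.enumerate g (↑j0)).foldl (fun d jx => d.modify jx.1 [] (fun v => v ++ [jx.2])) (cdict vs)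
      = cdict ((pvOps j0 g).foldl pvUpd2 vs) := by
  intro g
  induction g with
  | nil => intro j0 vs _ _; simp [PySem.List.enumerate, pvOps]
  | cons x t ih =>
    intro j0 vs hvs hle
    simp only [List.length_cons] at hle
    rw [PySem.List.enumerate_cons, List.foldl_cons]
    simp only
    rw [pv_modify_cdict vs j0 (by omega) x]
    have hs : (↑j0 : Int) + 1 = ↑(j0 + 1) := by push_cast; ring
    rw [hs, ih (j0+1) (pvUpd vs j0 x) (by simp [pvUpd, hvs]) (by omega)]
    simp [pvOps, pvUpd2]

-- later even group, B side: divmod gives (r, j0), r even, q = j0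
lemma pv_chunkB_even (w N r : Nat) (hw : 0 < w) (hr : r % 2 = 0) :
    ∀ (g : List String) (j0 : Nat) (vs : List (List String)),
    vs.length = w → j0 + g.length ≤ w →
    (PySem.List.enumerate g (↑(w * r + j0))).foldl (pvBStep (↑w) (↑N)) (cdict vs)
      = cdict ((pvOps j0 g).foldl pvUpd2 vs) := by
  intro g
  induction g with
  | nil => intro j0 vs _ _; simp [PySem.List.enumerate, pvOps]
  | cons x t ih =>
    intro j0 vs hvs hle
    simp only [List.length_cons] at hle
    rw [PySem.List.enumerate_cons, List.foldl_cons]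
    have hstep : pvBStep (↑w) (↑N) (cdict vs) (↑(w * r + j0), x) = cdict (pvUpd vs j0 x) := by
      simp only [pvBStep]
      have hdiv : PySem.Int.floordiv (↑(w * r + j0)) (↑w) = (((w * r + j0) / w : Nat) : Int) :=
        PySem.Int.floordiv_natCast _ _
      have hdivr : ((w * r + j0) / w : Nat) = r := by
        rw [Nat.mul_add_div hw, Nat.div_eq_of_lt (by omega)]; omega
      have hmod : PySem.Int.mod (↑(w * r + j0)) (↑w) = (((w * r + j0) % w : Nat) : Int) :=
        PySem.Int.mod_natCast _ _
      have hmodr : ((w * r + j0) % w : Nat) = j0 := by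
        rw [Nat.mul_add_mod, Nat.mod_eq_of_lt (by omega)]
      rw [hdiv, hdivr, hmod, hmodr]
      have hpar : PySem.Int.mod (↑r) 2 = 0 := by
        rw [PySem.Int.mod_eq_emod_of_pos (by norm_num)]; omega
      rw [hpar]
      norm_num
      exact pv_modify_cdict vs j0 (by omega) x
    rw [hstep]
    have hs : (↑(w * r + j0) : Int) + 1 = ↑(w * r + (j0 + 1)) := by push_cast; ring
    rw [hs, ih (j0+1) (pvUpd vs j0 x) (by simp [pvUpd, hvs]) (by omega)]
    simp [pvOps, pvUpd2]

-- odd group, A side: keys w-1-j over the reversed group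
lemma pv_chunkA_odd (w : Nat) : ∀ (gr : List String) (j0 : Nat) (vs : List (List String)),
    vs.length = w → j0 + gr.length ≤ w →
    (PySem.List.enumerate gr (↑j0)).foldl (fun d jx => d.modify ((↑w) - 1 - jx.1) [] (fun v => v ++ [jx.2])) (cdict vs)
      = cdict ((pvOps j0 gr).foldl (fun vs px => pvUpd vs (w - 1 - px.1) px.2) vs) := by
  intro gr
  induction gr with
  | nil => intro j0 vs _ _; simp [PySem.List.enumerate, pvOps]
  | cons x t ih =>
    intro j0 vs hvs hle
    simp only [List.length_cons] at hle
    rw [PySem.List.enumerate_cons, List.foldl_cons]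
    simp only
    have hk : ((↑w : Int) - 1 - ↑j0) = ↑(w - 1 - j0) := by omega
    rw [hk, pv_modify_cdict vs (w - 1 - j0) (by omega) x]
    have hs : (↑j0 : Int) + 1 = ↑(j0 + 1) := by push_cast; ring
    rw [hs, ih (j0+1) (pvUpd vs (w-1-j0) x) (by simp [pvUpd, hvs]) (by omega)]
    simp [pvOps]

-- odd group, B side: q = w - m' + j, m' = min w (N - w*r) fixed for the group
lemma pv_chunkB_odd (w N r m' : Nat) (hw : 0 < w) (hr : r % 2 = 1)
    (hm' : m' = min w (N - w * r)) (hwr : w * r ≤ N) :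
    ∀ (t : List String) (j0 : Nat) (vs : List (List String)),
    vs.length = w → j0 + t.length ≤ m' →
    (PySem.List.enumerate t (↑(w * r + j0))).foldl (pvBStep (↑w) (↑N)) (cdict vs)
      = cdict ((pvOps (w - m' + j0) t).foldl pvUpd2 vs) := by
  intro t
  induction t with
  | nil => intro j0 vs _ _; simp [PySem.List.enumerate, pvOps]
  | cons x tt ih =>
    intro j0 vs hvs hle
    simp only [List.length_cons] at hle
    have hm'w : m' ≤ w := by omega
    rw [PySem.List.enumerate_cons, List.foldl_cons]
    have hstep : pvBStep (↑w) (↑N) (cdict vs) (↑(w * r + j0), x) = cdict (pvUpd vs (w - m' + j0) x) := by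
      simp only [pvBStep]
      have hdiv : PySem.Int.floordiv (↑(w * r + j0)) (↑w) = (((w * r + j0) / w : Nat) : Int) :=
        PySem.Int.floordiv_natCast _ _
      have hdivr : ((w * r + j0) / w : Nat) = r := by
        rw [Nat.mul_add_div hw, Nat.div_eq_of_lt (by omega)]; omega
      have hmod : PySem.Int.mod (↑(w * r + j0)) (↑w) = (((w * r + j0) % w : Nat) : Int) :=
        PySem.Int.mod_natCast _ _
      have hmodr : ((w * r + j0) % w : Nat) = j0 := by
        rw [Nat.mul_add_mod, Nat.mod_eq_of_lt (by omega)]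
      rw [hdiv, hdivr, hmod, hmodr]
      have hpar : PySem.Int.mod (↑r) 2 = 1 := by
        rw [PySem.Int.mod_eq_emod_of_pos (by norm_num)]; omega
      rw [hpar]
      norm_num
      have hsub : ((↑N : Int) - ↑r * ↑w) = ↑(N - w * r) := by
        push_cast [Nat.cast_sub hwr]
        ring
      rw [hsub]
      have hmin : min (↑w : Int) (↑(N - w * r)) = ↑m' := by
        rw [hm']
        exact_mod_cast (Nat.cast_min (m := w) (n := N - w * r)).symm
      rw [hmin]
      have hq : ((↑w : Int) - ↑m' + ↑j0) = ↑(w - m' + j0) := by omega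
      rw [hq]
      exact pv_modify_cdict vs (w - m' + j0) (by omega) x
    rw [hstep]
    have hs : (↑(w * r + j0) : Int) + 1 = ↑(w * r + (j0 + 1)) := by push_cast; ring
    rw [hs, ih (j0+1) (pvUpd vs (w - m' + j0) x) (by simp [pvUpd, hvs]) (by omega)]
    have : w - m' + (j0 + 1) = (w - m' + j0) + 1 := by omega
    simp [pvOps, pvUpd2, this]

lemma pv_pvOps_append : ∀ (l1 l2 : List String) (j0 : Nat),
    pvOps j0 (l1 ++ l2) = pvOps j0 l1 ++ pvOps (j0 + l1.length) l2 := by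
  intro l1
  induction l1 with
  | nil => intro l2 j0; simp [pvOps]
  | cons x t ih =>
    intro l2 j0
    simp only [List.cons_append, pvOps, ih, List.length_cons]
    have : j0 + 1 + t.length = j0 + (t.length + 1) := by omega
    rw [this]

lemma pv_mem_pvOps : ∀ (g : List String) (j0 : Nat) (px : Nat × String),
    px ∈ pvOps j0 g → j0 ≤ px.1 ∧ px.1 < j0 + g.length := by
  intro g
  induction g with
  | nil => intro j0 px h; simp [pvOps] at h
  | cons x t ih =>
    intro j0 px h
    simp only [pvOps, List.mem_cons] at h
    rcases h with h | h
    · subst h; refine ⟨le_refl _, ?_⟩; simp only [List.length_cons]; omega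
    · have := ih (j0+1) px h; simp only [List.length_cons]; omega

lemma pv_nodup_fst_pvOps : ∀ (g : List String) (j0 : Nat),
    ((pvOps j0 g).map Prod.fst).Nodup := by
  intro g
  induction g with
  | nil => intro j0; simp [pvOps]
  | cons x t ih =>
    intro j0
    simp only [pvOps, List.map_cons, List.nodup_cons]
    refine ⟨?_, ih (j0+1)⟩
    intro hmem
    rcases List.mem_map.1 hmem with ⟨px, hpx, hfst⟩
    have := pv_mem_pvOps t (j0+1) px hpx
    omega

lemma pv_pvOps_rev : ∀ (g : List String) (w : Nat), g.length ≤ w →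
    (pvOps (w - g.length) g).reverse = (pvOps 0 g.reverse).map (fun px => (w - 1 - px.1, px.2)) := by
  intro g
  induction g with
  | nil => intro w _; simp [pvOps]
  | cons x t ih =>
    intro w hle
    simp only [List.length_cons] at hle
    have h1 : pvOps (w - (t.length + 1)) (x :: t)
        = (w - (t.length + 1), x) :: pvOps (w - (t.length + 1) + 1) t := rfl
    simp only [List.length_cons, h1, List.reverse_cons]
    have h2 : w - (t.length + 1) + 1 = w - t.length := by omega
    rw [h2, ih w (by omega)]
    rw [pv_pvOps_append, List.map_append]
    simp only [List.length_reverse]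
    have h3 : pvOps (0 + t.length) [x] = [(t.length, x)] := by simp [pvOps]
    rw [h3]
    simp only [List.map_cons, List.map_nil]
    have h4 : w - 1 - t.length = w - (t.length + 1) := by omega
    rw [h4]

lemma pv_pvUpd_comm (vs : List (List String)) (p q : Nat) (x y : String) (h : p ≠ q) :
    pvUpd (pvUpd vs p x) q y = pvUpd (pvUpd vs q y) p x := by
  unfold pvUpd
  rw [List.getD_eq_getElem?_getD, List.getD_eq_getElem?_getD,
      List.getD_eq_getElem?_getD, List.getD_eq_getElem?_getD]
  rw [List.getElem?_set_ne (by omega), List.getElem?_set_ne (by omega)]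
  exact List.set_comm _ _ (by omega)

lemma pv_fold_rev_pvUpd2 (L : List (Nat × String)) (hnd : (L.map Prod.fst).Nodup)
    (vs : List (List String)) :
    L.reverse.foldl pvUpd2 vs = L.foldl pvUpd2 vs := by
  refine (List.reverse_perm L).foldl_eq' ?_ vs
  intro a ha b hb z
  rw [List.mem_reverse] at ha hb
  by_cases hab : a = b
  · subst hab; rfl
  · have hfst : a.1 ≠ b.1 := by
      intro hf
      exact hab (List.inj_on_of_nodup_map hnd ha hb hf)
    exact pv_pvUpd_comm z a.1 b.1 a.2 b.2 hfst

lemma pv_len_fold_pvUpd2 : ∀ (L : List (Nat × String)) (vs : List (List String)),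
    (L.foldl pvUpd2 vs).length = vs.length := by
  intro L
  induction L with
  | nil => intro vs; rfl
  | cons px t ih => intro vs; rw [List.foldl_cons, ih]; simp [pvUpd2, pvUpd]

lemma pv_chunks_nil (w : Nat) : ∀ fuel, pvChunks w fuel [] = [] := by
  intro fuel; cases fuel <;> simp [pvChunks]

lemma pv_chunkLoop_eq (n : Int) (hn : 1 ≤ n) (files : List String) :
    ∀ (fuel : Nat) (i : Nat) (acc : List (List String)), files.length ≤ i + fuel →
    pvChunkLoop n files fuel (↑i) acc = acc ++ pvChunks n.toNat fuel (files.drop i) := by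
  intro fuel
  induction fuel with
  | zero =>
    intro i acc hle
    rw [List.drop_eq_nil_of_le (by omega)]
    simp [pvChunkLoop, pvChunks]
  | succ fuel ih =>
    intro i acc hle
    by_cases hlt : i < files.length
    · have hlt' : (↑i : Int) < ↑files.length := by exact_mod_cast hlt
      have hne : files.drop i ≠ [] := by
        intro hnil
        have := List.drop_eq_nil_iff.1 hnil
        omega
      have hgrp : (if (↑i : Int) + n > ↑files.length
            then PySem.List.slice files (some ↑i) none
            else PySem.List.slice files (some ↑i) (some (↑i + n)))
          = (files.drop i).take n.toNat := by
        have hcast : n = ((n.toNat : Nat) : Int) := by omega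
        by_cases hover : (↑i : Int) + n > ↑files.length
        · rw [if_pos hover, PySem.List.slice_from_natCast]
          rw [List.take_of_length_le (by simp; omega)]
        · rw [if_neg hover]
          conv_lhs => rw [hcast]
          rw [PySem.List.slice_natCast_add]
      conv_lhs => rw [pvChunkLoop]
      rw [if_pos hlt']
      simp only
      rw [hgrp]
      have hstep : (↑i : Int) + n = ↑(i + n.toNat) := by omega
      rw [hstep, ih (i + n.toNat) (acc ++ [(files.drop i).take n.toNat]) (by omega)]
      conv_rhs => rw [pvChunks]
      rw [if_neg hne]
      rw [List.drop_drop]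
      have : i + n.toNat = n.toNat + i := by omega
      rw [this]
      simp
    · have hnlt : ¬ ((↑i : Int) < ↑files.length) := by exact_mod_cast hlt
      conv_lhs => rw [pvChunkLoop]
      rw [if_neg hnlt]
      rw [List.drop_eq_nil_of_le (by omega), pv_chunks_nil]
      simp

-- the main snake induction over the remaining groups (r ≥ 1)
lemma pv_main (w N : Nat) (hw : 2 ≤ w) :
    ∀ (fuel : Nat) (rest : List String) (r : Nat) (vs : List (List String)),
    1 ≤ r → vs.length = w → rest.length ≤ fuel → w * r + rest.length = N →
    pvDistLoop (↑w) (pvChunks w fuel rest) (↑r) (cdict vs)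
      = (PySem.List.enumerate rest (↑(w * r))).foldl (pvBStep (↑w) (↑N)) (cdict vs) := by
  intro fuel
  induction fuel with
  | zero =>
    intro rest r vs hr hvs hfuel hN
    have : rest = [] := List.length_eq_zero_iff.1 (by omega)
    subst this
    simp [pvChunks, pvDistLoop, PySem.List.enumerate]
  | succ fuel ih =>
    intro rest r vs hr hvs hfuel hN
    by_cases hrest : rest = []
    · subst hrest
      simp [pvChunks, pvDistLoop, PySem.List.enumerate]
    · have hrl : 1 ≤ rest.length := by
        cases rest with
        | nil => exact absurd rfl hrest
        | cons a b => simp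
      set g := rest.take w with hg
      set rest' := rest.drop w with hrest'
      have hm : g.length = min w rest.length := by simp [hg]
      have hmw : g.length ≤ w := by omega
      have hchunks : pvChunks w (fuel+1) rest = g :: pvChunks w fuel rest' := by
        conv_lhs => rw [pvChunks]
        rw [if_neg hrest]
      have hsplit : rest = g ++ rest' := (List.take_append_drop w rest).symm
      have hi0 : ((↑r : Int) == 0) = false := by simp; omega
      have hnotparboth : PySem.Int.mod (↑r) 2 = ↑(r % 2) := by
        rw [PySem.Int.mod_eq_emod_of_pos (by norm_num)]; omega
      -- B side: split the enumerate at the chunk boundary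
      have hB : (PySem.List.enumerate rest (↑(w * r))).foldl (pvBStep (↑w) (↑N)) (cdict vs)
          = (PySem.List.enumerate rest' ((↑(w*r) : Int) + ↑g.length)).foldl (pvBStep (↑w) (↑N))
              ((PySem.List.enumerate g (↑(w * r))).foldl (pvBStep (↑w) (↑N)) (cdict vs)) := by
        conv_lhs => rw [hsplit]
        rw [PySem.List.enumerate_append, List.foldl_append]
      rcases Nat.even_or_odd r with hre | hro
      · -- even group
        have hr2 : r % 2 = 0 := Nat.even_iff.1 hre
        have hpar : (PySem.Int.mod (↑r) 2 == 0) = true := by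
          rw [hnotparboth, hr2]; rfl
        have hA1 : pvDistLoop (↑w) (pvChunks w (fuel+1) rest) (↑r) (cdict vs)
            = pvDistLoop (↑w) (pvChunks w fuel rest') ((↑r : Int) + 1)
                ((PySem.List.enumerate g 0).foldl (fun d jx => d.modify jx.1 [] (fun v => v ++ [jx.2])) (cdict vs)) := by
          rw [hchunks]
          conv_lhs => rw [pvDistLoop]
          rw [hpar, hi0]
          simp
        have hzero : (0 : Int) = ((0 : Nat) : Int) := rfl
        have hAgrp : (PySem.List.enumerate g (0 : Int)).foldl (fun d jx => d.modify jx.1 [] (fun v => v ++ [jx.2])) (cdict vs)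
            = cdict ((pvOps 0 g).foldl pvUpd2 vs) := by
          rw [hzero]
          exact pv_chunkA_even w g 0 vs hvs (by omega)
        have hBgrp : (PySem.List.enumerate g (↑(w * r))).foldl (pvBStep (↑w) (↑N)) (cdict vs)
            = cdict ((pvOps 0 g).foldl pvUpd2 vs) := by
          have : (↑(w * r) : Int) = ↑(w * r + 0) := by norm_num
          rw [this]
          exact pv_chunkB_even w N r (by omega) hr2 g 0 vs hvs (by omega)
        rw [hA1, hAgrp, hB, hBgrp]
        by_cases hlen : rest.length ≤ w
        · have : rest' = [] := by rw [hrest']; exact List.drop_eq_nil_of_le hlen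
          rw [this, pv_chunks_nil]
          simp [pvDistLoop, PySem.List.enumerate]
        · have hgw : g.length = w := by omega
          have hstart : (↑(w*r) : Int) + ↑g.length = ↑(w * (r+1)) := by
            rw [hgw]; push_cast; ring
          have hr1 : (↑r : Int) + 1 = ↑(r+1) := by push_cast; ring
          rw [hstart, hr1]
          exact ih rest' (r+1) ((pvOps 0 g).foldl pvUpd2 vs) (by omega)
            (by rw [pv_len_fold_pvUpd2]; exact hvs)
            (by simp [hrest']; omega)
            (by simp [hrest']; omega)
      · -- odd group
        have hr2 : r % 2 = 1 := Nat.odd_iff.1 hro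
        have hpar : (PySem.Int.mod (↑r) 2 == 0) = false := by
          rw [hnotparboth, hr2]; rfl
        have hA1 : pvDistLoop (↑w) (pvChunks w (fuel+1) rest) (↑r) (cdict vs)
            = pvDistLoop (↑w) (pvChunks w fuel rest') ((↑r : Int) + 1)
                ((PySem.List.enumerate g.reverse 0).foldl (fun d jx => d.modify ((↑w) - 1 - jx.1) [] (fun v => v ++ [jx.2])) (cdict vs)) := by
          rw [hchunks]
          conv_lhs => rw [pvDistLoop]
          rw [hpar]
          simp
        have hzero : (0 : Int) = ((0 : Nat) : Int) := rfl
        set m := g.length with hmg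
        have hAgrp : (PySem.List.enumerate g.reverse (0 : Int)).foldl (fun d jx => d.modify ((↑w) - 1 - jx.1) [] (fun v => v ++ [jx.2])) (cdict vs)
            = cdict ((pvOps (w - m) g).foldl pvUpd2 vs) := by
          rw [hzero, pv_chunkA_odd w g.reverse 0 vs hvs (by simp only [List.length_reverse, ← hmg]; omega)]
          congr 1
          have e1 : (pvOps 0 g.reverse).foldl (fun vs px => pvUpd vs (w - 1 - px.1) px.2) vs
              = ((pvOps 0 g.reverse).map (fun px => (w - 1 - px.1, px.2))).foldl pvUpd2 vs := by
            rw [List.foldl_map]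
            rfl
          rw [e1, ← pv_pvOps_rev g w hmw]
          exact pv_fold_rev_pvUpd2 _ (pv_nodup_fst_pvOps g (w - m)) vs
        have hBgrp : (PySem.List.enumerate g (↑(w * r))).foldl (pvBStep (↑w) (↑N)) (cdict vs)
            = cdict ((pvOps (w - m) g).foldl pvUpd2 vs) := by
          have hcast : (↑(w * r) : Int) = ↑(w * r + 0) := by norm_num
          have hm' : m = min w (N - w * r) := by omega
          have := pv_chunkB_odd w N r m (by omega) hr2 hm' (by omega) g 0 vs hvs (by omega)
          rw [hcast]
          simpa using this
        rw [hA1, hAgrp, hB, hBgrp]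
        by_cases hlen : rest.length ≤ w
        · have : rest' = [] := by rw [hrest']; exact List.drop_eq_nil_of_le hlen
          rw [this, pv_chunks_nil]
          simp [pvDistLoop, PySem.List.enumerate]
        · have hgw : m = w := by omega
          have hstart : (↑(w*r) : Int) + ↑g.length = ↑(w * (r+1)) := by
            rw [← hmg, hgw]; push_cast; ring
          have hr1 : (↑r : Int) + 1 = ↑(r+1) := by push_cast; ring
          rw [hstart, hr1]
          exact ih rest' (r+1) ((pvOps (w - m) g).foldl pvUpd2 vs) (by omega)
            (by rw [pv_len_fold_pvUpd2]; exact hvs)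
            (by simp [hrest']; omega)
            (by simp [hrest']; omega)

-- assembling the w ≥ 2, files ≠ [] case
lemma pv_top (w : Nat) (hw : 2 ≤ w) (files : List String) (hf : files ≠ []) :
    (pvDistLoop (↑w) (pvChunkLoop (↑w) files (files.length + 1) 0 []) 0 PySem.Dict.empty).items
      = ((PySem.List.enumerate files 0).foldl (pvBStep (↑w) (↑files.length)) PySem.Dict.empty).items := by
  set N := files.length with hN
  have hN1 : 1 ≤ N := by
    cases files with
    | nil => exact absurd rfl hf
    | cons a b => simp [hN]
  have hchunk : pvChunkLoop (↑w) files (N + 1) 0 []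
      = pvChunks w (N + 1) files := by
    have h := pv_chunkLoop_eq (↑w) (by exact_mod_cast Nat.one_le_iff_ne_zero.2 (by omega)) files (N+1) 0 [] (by omega)
    simpa using h
  rw [hchunk]
  set g0 := files.take w with hg0
  set rest0 := files.drop w with hrest0
  have hchunks1 : pvChunks w (N+1) files = g0 :: pvChunks w N rest0 := by
    conv_lhs => rw [pvChunks]
    rw [if_neg hf]
  have hempty : (PySem.Dict.empty : PySem.Dict Int (List String)) = cdict [] := rfl
  set vs0 := g0.map (fun x => [x]) with hvs0
  have hg0len : g0.length = min w N := by simp [hg0, hN]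
  have hA1 : pvDistLoop (↑w) (pvChunks w (N+1) files) 0 PySem.Dict.empty
      = pvDistLoop (↑w) (pvChunks w N rest0) 1 (cdict vs0) := by
    rw [hchunks1]
    conv_lhs => rw [pvDistLoop]
    have hpar : (PySem.Int.mod 0 2 == 0) = true := by decide
    rw [hpar]
    simp only [BEq.rfl, if_true]
    rw [hempty, pv_grp0A' g0]
    rw [hvs0]
    norm_num
  have hB1 : (PySem.List.enumerate files 0).foldl (pvBStep (↑w) (↑N)) PySem.Dict.empty
      = (PySem.List.enumerate rest0 ((0 : Int) + ↑g0.length)).foldl (pvBStep (↑w) (↑N)) (cdict vs0) := by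
    conv_lhs => rw [show files = g0 ++ rest0 from (List.take_append_drop w files).symm]
    rw [PySem.List.enumerate_append, List.foldl_append]
    congr 1
    rw [hempty, pv_grp0B' w N (by omega) g0 (by omega)]
  rw [hA1, hB1]
  by_cases hlen : N ≤ w
  · have hnil : rest0 = [] := by rw [hrest0]; exact List.drop_eq_nil_of_le (by omega)
    rw [hnil, pv_chunks_nil]
    simp [pvDistLoop, PySem.List.enumerate]
  · have hg0w : g0.length = w := by omega
    have hvs0len : vs0.length = w := by simp [hvs0]; omega
    have hstart : ((0 : Int) + ↑g0.length) = ↑(w * 1) := by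
      rw [hg0w]; push_cast; ring
    have hone : (1 : Int) = ↑(1 : Nat) := rfl
    rw [hstart, hone, pv_main w N hw N rest0 1 vs0 (by omega) hvs0len
      (by simp [hrest0]; omega) (by simp [hrest0]; omega)]

-- ===== VERDICT (by name: the statement is the Claim_ definition above) =====
theorem snake_data_partition_spec : Claim_equal_snake_data_partition := by
  unfold Claim_equal_snake_data_partition
  intro sf ws _hdom hpre
  unfold Spec_snake_data_partition
  unfold snake_data_partition snake_data_partition_alt
  rw [pvFilesOf_eq]
  by_cases h1 : ws = 1
  · subst h1
    simp only [BEq.rfl, if_true]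
    rfl
  · have hws1 : (ws == 1) = false := by simp [h1]
    rw [hws1]
    simp only [Bool.false_eq_true, if_false]
    by_cases h0 : sf = []
    · subst h0
      rfl
    · have hws : 1 ≤ ws := by
        rcases hpre with h | h
        · exact h
        · exact absurd h h0
      have hws2 : 2 ≤ ws := by
        rcases lt_or_ge ws 2 with h | h
        · exfalso; apply h1; omega
        · exact h
      obtain ⟨w, rfl⟩ : ∃ w : Nat, ws = ↑w := ⟨ws.toNat, by omega⟩
      have hw2 : 2 ≤ w := by exact_mod_cast hws2
      have hf : sf.map (fun f => f.2) ≠ [] := by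
        simpa using h0
      exact pv_top w hw2 (sf.map (fun f => f.2)) hf
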